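-- pv_equiv track=rewrite | github.com/Ashmitcodez/similarity-detector-web-app | FindMatchIndices.py | FindMatchIndices
-- ===== SOURCE A (Python) =====
-- def FindMatchIndices(Array1, Array2):
--     """
--     Find indices in Array1 where elements match any element in Array2.
--
--     Args:
--         Array1 (list): The first list of elements.
--         Array2 (list): The second list of elements.
--
--     Returns:
--         list: A list of indices (from Array1) where Array1[i] == Array2[j] for some j.
--
--     Notes:
--         - This does not guarantee uniqueness of indices if duplicates appear in Array2.
--         - Complexity is O(n*m) for n=len(Array1), m=len(Array2).
--
--     Example:
--         >>> FindMatchIndices([1,2,3,4], [2,4,6])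
--         [1, 3]
--     """
--     if not isinstance(Array1, list) or not isinstance(Array2, list):
--         raise TypeError("Both inputs must be lists.")
--
--     output = []
--     for i in range(len(Array1)):
--         for j in range(len(Array2)):
--             if Array1[i] == Array2[j]:
--                 output.append(i)
--     return output
-- ===== SOURCE B (Python) =====
-- def FindMatchIndices(Array1, Array2):
--     count = {}
--     for x in Array2:
--         count[x] = count.get(x, 0) + 1
--     output = []
--     for i, x in enumerate(Array1):
--         output.extend([i] * count.get(x, 0))
--     return output
-- ===== Notes on version B (the rewrite author's own statement) =====
-- stated objective: faster
-- what changed: Replaces the nested O(n*m) scan with a one-pass dictionary counter over Array2, then a single pass over Array1 emitting each index i repeated count[Array1[i]] times.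
import Mathlib
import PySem

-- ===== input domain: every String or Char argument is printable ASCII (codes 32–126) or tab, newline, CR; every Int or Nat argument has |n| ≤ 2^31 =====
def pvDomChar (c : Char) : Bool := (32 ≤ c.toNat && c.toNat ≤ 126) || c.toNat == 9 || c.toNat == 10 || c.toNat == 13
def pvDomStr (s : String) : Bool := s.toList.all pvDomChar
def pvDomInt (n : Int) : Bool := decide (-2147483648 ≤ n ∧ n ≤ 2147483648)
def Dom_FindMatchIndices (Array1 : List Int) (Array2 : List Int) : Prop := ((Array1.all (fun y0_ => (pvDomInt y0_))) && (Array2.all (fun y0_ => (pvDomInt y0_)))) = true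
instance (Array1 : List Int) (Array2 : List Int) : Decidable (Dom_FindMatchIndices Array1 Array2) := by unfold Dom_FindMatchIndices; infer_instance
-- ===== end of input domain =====

-- B replaces A's nested O(n*m) scan by a counter of Array2 plus one pass over Array1 (faster, in a timing run).

-- ===== PORT A =====
def FindMatchIndices (Array1 : List Int) (Array2 : List Int) : List Int :=
  (PySem.List.pyRange 0 (Array1.length : Int) 1).foldl (fun output i =>
    (PySem.List.pyRange 0 (Array2.length : Int) 1).foldl (fun output j =>
      if PySem.List.pyGetD Array1 i 0 == PySem.List.pyGetD Array2 j 0 then output ++ [i] else output)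
      output) []

-- ===== PORT B =====
def FindMatchIndices_alt (Array1 : List Int) (Array2 : List Int) : List Int :=
  let count := Array2.foldl (fun d x => d.insert x (d.getD x 0 + 1)) (PySem.Dict.empty : PySem.Dict Int Int)
  (PySem.List.enumerate Array1 0).foldl (fun output p =>
    output ++ PySem.List.pyRepeat [p.1] (count.getD p.2 0)) []

-- ===== PRECONDITION & SPEC =====
def Spec_FindMatchIndices (Array1 : List Int) (Array2 : List Int) (out : List Int) : Prop := out = FindMatchIndices_alt Array1 Array2
instance (Array1 : List Int) (Array2 : List Int) (out : List Int) : Decidable (Spec_FindMatchIndices Array1 Array2 out) := by unfold Spec_FindMatchIndices; infer_instance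

-- ===== CLAIM (what is proved, stated in full; the proofs are below) =====
def Claim_equal_FindMatchIndices : Prop := ∀ (Array1 : List Int) (Array2 : List Int), Dom_FindMatchIndices Array1 Array2 → Spec_FindMatchIndices Array1 Array2 (FindMatchIndices Array1 Array2)

-- ===== LEMMAS AND PROOFS =====

-- A's inner loop over Array2 appends i once per occurrence of x in Array2.
theorem inner_loop_eq (A2 : List Int) (x i : Int) (out : List Int) :
    A2.foldl (fun output y => if x == y then output ++ [i] else output) out
      = out ++ List.replicate (A2.count x) i := by
  induction A2 generalizing out with
  | nil => simp
  | cons y t ih =>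
      by_cases h : x = y
      · rw [List.foldl_cons, if_pos (by simp [h]), ih]
        subst h
        simp [List.replicate_succ]
      · rw [List.foldl_cons, if_neg (by simp [h]), ih]
        simp only [List.count_cons]
        rw [if_neg (by exact fun hc => h (beq_iff_eq.mp hc).symm)]
        simp

theorem FindMatchIndices_eq_alt (A1 A2 : List Int) :
    FindMatchIndices A1 A2 = FindMatchIndices_alt A1 A2 := by
  unfold FindMatchIndices FindMatchIndices_alt
  rw [PySem.List.enumerate_eq_map_pyRange (d := 0), List.foldl_map]
  apply PySem.List.foldl_congr_mem
  intro out i hi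
  rw [PySem.List.foldl_pyRange_zero_pyGetD' (xs := A2) (d := 0) (init := out)
        (f := fun output y => if PySem.List.pyGetD A1 i 0 == y then output ++ [i] else output),
      inner_loop_eq, PySem.Dict.getD_foldl_insert_add_one]
  simp [PySem.List.pyRepeat_singleton, PySem.Dict.getD_empty]

-- ===== VERDICT (by name: the statement is the Claim_ definition above) =====
theorem FindMatchIndices_spec : Claim_equal_FindMatchIndices := by
  intro A1 A2 _
  unfold Spec_FindMatchIndices
  exact FindMatchIndices_eq_alt A1 A2
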